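-- pv_equiv track=rewrite | github.com/meliodust/EncRizz | crypto.py | custom_poly_encrypt
-- ===== SOURCE A (Python) =====
-- def custom_poly_encrypt(text, shifts=[3, 1, 4]):
--     result = []
--     shift_index = 0
--     for char in text:
--         if char.isalpha():
--             shift = shifts[shift_index % len(shifts)]
--             base = ord('A') if char.isupper() else ord('a')
--             result.append(chr((ord(char) - base + shift) % 26 + base))
--             shift_index += 1
--         else:
--             result.append(char)
--     return ''.join(result)
-- ===== SOURCE B (Python) =====
-- def _shift_letter(c, s):
--     base = ord('A') if c.isupper() else ord('a')
--     return chr((ord(c) - base + s) % 26 + base)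
--
-- def custom_poly_encrypt(text, shifts=[3, 1, 4]):
--     n = len(shifts)
--     enc = [_shift_letter(c, shifts[i % n])
--            for i, c in enumerate(c for c in text if c.isalpha())]
--     it = iter(enc)
--     return ''.join(next(it) if c.isalpha() else c for c in text)
-- ===== Notes on version B (the rewrite author's own statement) =====
-- stated objective: alternative
-- what changed: B splits the work into two passes: it first extracts the letters and enciphers that subsequence with enumerate (shift i % n per letter), then merges the enciphered letters back into the original text, replacing A's single loop with a manual shift_index counter.
import Mathlib
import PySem

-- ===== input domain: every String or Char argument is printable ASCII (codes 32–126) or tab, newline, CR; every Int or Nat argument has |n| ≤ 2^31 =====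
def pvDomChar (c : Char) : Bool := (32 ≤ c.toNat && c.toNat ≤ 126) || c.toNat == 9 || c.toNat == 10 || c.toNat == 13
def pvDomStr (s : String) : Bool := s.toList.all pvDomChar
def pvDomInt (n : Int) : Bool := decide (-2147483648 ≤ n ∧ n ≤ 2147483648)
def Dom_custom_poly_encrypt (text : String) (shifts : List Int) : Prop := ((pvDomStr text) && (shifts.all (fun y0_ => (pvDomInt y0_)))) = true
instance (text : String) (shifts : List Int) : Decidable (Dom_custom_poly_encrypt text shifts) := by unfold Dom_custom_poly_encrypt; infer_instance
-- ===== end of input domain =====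

-- B re-decomposes A's single counter loop into two passes (encipher the letter subsequence, then merge back); equal return values proved on Pre_ (A raises ZeroDivisionError outside it).

-- ===== PORT A =====
-- A's loop: result list + running shift_index; shifts.getD is exact since Pre_ rules out the shifts = [] ∧ letter-present case where Python's `%` raises.
def pvALoop (shifts : List Int) : List Char → Nat → List Char
  | [], _ => []
  | c :: cs, k =>
    if PySem.Chars.isalpha c then
      let shift := shifts.getD (k % shifts.length) 0
      let base : Int := if PySem.Chars.isupper c then 65 else 97
      Char.ofNat (PySem.Int.mod ((c.toNat : Int) - base + shift) 26 + base).toNat :: pvALoop shifts cs (k + 1)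
    else
      c :: pvALoop shifts cs k

def custom_poly_encrypt (text : String) (shifts : List Int) : String :=
  String.ofList (pvALoop shifts text.toList 0)

-- ===== PORT B =====
-- B's helper _shift_letter
def pvShiftLetter (c : Char) (s : Int) : Char :=
  let base : Int := if PySem.Chars.isupper c then 65 else 97
  Char.ofNat (PySem.Int.mod ((c.toNat : Int) - base + s) 26 + base).toNat

-- merge pass: emit the next enciphered letter at alphabetic positions, the original char otherwise
def pvMerge : List Char → List Char → List Char
  | [], _ => []
  | c :: cs, es =>
    if PySem.Chars.isalpha c then es.headD c :: pvMerge cs es.tail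
    else c :: pvMerge cs es

def custom_poly_encrypt_alt (text : String) (shifts : List Int) : String :=
  let enc := (text.toList.filter PySem.Chars.isalpha).zipIdx.map
      (fun p => pvShiftLetter p.1 (shifts.getD (p.2 % shifts.length) 0))
  String.ofList (pvMerge text.toList enc)

-- ===== PRECONDITION & SPEC =====
-- Pre_ excludes exactly the inputs where Python A raises ZeroDivisionError: empty shifts together with at least one letter in text.
def Pre_custom_poly_encrypt (text : String) (shifts : List Int) : Prop :=
  shifts ≠ [] ∨ text.toList.all (fun c => ¬ PySem.Chars.isalpha c)
instance (text : String) (shifts : List Int) : Decidable (Pre_custom_poly_encrypt text shifts) := by unfold Pre_custom_poly_encrypt; infer_instance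
def pvWitness_custom_poly_encrypt : String × List Int := ("Hi, there!", [3, 1, 4])
def Spec_custom_poly_encrypt (text : String) (shifts : List Int) (out : String) : Prop := out = custom_poly_encrypt_alt text shifts
instance (text : String) (shifts : List Int) (out : String) : Decidable (Spec_custom_poly_encrypt text shifts out) := by unfold Spec_custom_poly_encrypt; infer_instance

-- ===== CLAIM (what is proved, stated in full; the proofs are below) =====
def Claim_equal_custom_poly_encrypt : Prop := ∀ (text : String) (shifts : List Int), Dom_custom_poly_encrypt text shifts → Pre_custom_poly_encrypt text shifts → Spec_custom_poly_encrypt text shifts (custom_poly_encrypt text shifts)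

-- ===== LEMMAS AND PROOFS =====
theorem pvMerge_eq (shifts : List Int) :
    ∀ (cs : List Char) (k : Nat),
      pvMerge cs ((cs.filter PySem.Chars.isalpha).zipIdx k |>.map
        (fun p => pvShiftLetter p.1 (shifts.getD (p.2 % shifts.length) 0))) = pvALoop shifts cs k := by
  intro cs
  induction cs with
  | nil => intro k; rfl
  | cons c cs ih =>
    intro k
    by_cases h : PySem.Chars.isalpha c = true
    · simp only [List.filter_cons, h, if_true, List.zipIdx_cons, List.map_cons, pvMerge, pvALoop,
        List.headD_cons, List.tail_cons]
      exact congrArg₂ List.cons rfl (ih (k + 1))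
    · simp only [List.filter_cons, h, Bool.false_eq_true, if_false, pvMerge, pvALoop]
      exact congrArg₂ List.cons rfl (ih k)

-- ===== VERDICT (by name: the statement is the Claim_ definition above) =====
theorem custom_poly_encrypt_spec : Claim_equal_custom_poly_encrypt := by
  intro text shifts _ _
  unfold Spec_custom_poly_encrypt custom_poly_encrypt custom_poly_encrypt_alt
  rw [← pvMerge_eq shifts text.toList 0]
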